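-- pv_equiv track=rewrite | github.com/fatmacankara/ASCARIS | code/alphafold_model.py | which_model
-- ===== SOURCE A (Python) =====
-- def which_model(position):
--     models_dict = {}
--     x = 1
--     for i, j in zip(range(1400, 27000, 200), range(1, 27000, 200)):
--         if position <= i and position >= j:
--             models_dict[x] = position
--         x += 1
--     return models_dict
-- ===== SOURCE B (Python) =====
-- def which_model(position):
--     # window x (1..128) covers [1+(x-1)*200, 1400+(x-1)*200]; solve for x directly
--     lo = max(0, -((1400 - position) // 200))
--     hi = min(127, (position - 1) // 200)
--     return {x + 1: position for x in range(lo, hi + 1)}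
-- ===== Notes on version B (the rewrite author's own statement) =====
-- stated objective: simpler
-- what changed: Replaces the loop over all fixed windows (building a dict entry per matching window) with a closed-form computation of the contiguous range of matching model indices via floor/ceil division, emitted as a single range comprehension.
import Mathlib
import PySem

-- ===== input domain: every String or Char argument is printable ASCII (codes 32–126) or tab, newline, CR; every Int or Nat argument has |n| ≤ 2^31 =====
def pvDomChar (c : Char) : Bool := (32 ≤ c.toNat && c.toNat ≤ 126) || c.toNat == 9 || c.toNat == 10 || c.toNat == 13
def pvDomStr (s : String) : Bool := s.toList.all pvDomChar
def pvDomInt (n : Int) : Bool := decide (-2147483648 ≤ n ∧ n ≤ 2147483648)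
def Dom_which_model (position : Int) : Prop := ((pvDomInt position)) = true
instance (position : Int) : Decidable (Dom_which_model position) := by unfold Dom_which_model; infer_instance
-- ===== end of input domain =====

-- B replaces A's scan over all 128 fixed windows by a closed-form computation of the
-- contiguous range of matching model indices (objective: simpler).

-- ===== PORT A =====
def which_model (position : Int) : List (Int × Int) :=
  let st := (((PySem.List.pyRange 1400 27000 200).zip (PySem.List.pyRange 1 27000 200)).foldl
    (fun (st : PySem.Dict Int Int × Int) ij =>
      ((if position ≤ ij.1 ∧ position ≥ ij.2 then st.1.insert st.2 position else st.1), st.2 + 1))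
    (PySem.Dict.empty, 1))
  st.1.items

-- ===== PORT B =====
def which_model_alt (position : Int) : List (Int × Int) :=
  let lo := max 0 (-(PySem.Int.floordiv (1400 - position) 200))
  let hi := min 127 (PySem.Int.floordiv (position - 1) 200)
  (PySem.List.pyRange lo (hi + 1) 1).map (fun x => (x + 1, position))

-- ===== PRECONDITION & SPEC =====
def Spec_which_model (position : Int) (out : List (Int × Int)) : Prop := out = which_model_alt position
instance (position : Int) (out : List (Int × Int)) : Decidable (Spec_which_model position out) := by unfold Spec_which_model; infer_instance

-- ===== CLAIM (what is proved, stated in full; the proofs are below) =====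
def Claim_equal_which_model : Prop := ∀ (position : Int), Dom_which_model position → Spec_which_model position (which_model position)

-- ===== LEMMAS AND PROOFS =====

-- the zipped literal window list is the map of a simple range
theorem pv_zip_eq :
    (PySem.List.pyRange 1400 27000 200).zip (PySem.List.pyRange 1 27000 200)
      = (PySem.List.pyRange 0 128 1).map (fun k => (1400 + 200 * k, 1 + 200 * k)) := by
  decide

-- loop invariant for A's fold: the dict's items are the matching indices in order, x = n+1
theorem pv_fold_items (position : Int) (n : Nat) :
    (((PySem.List.pyRange 0 (n : Int) 1).foldl
        (fun (st : PySem.Dict Int Int × Int) (k : Int) =>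
          ((if position ≤ 1400 + 200 * k ∧ position ≥ 1 + 200 * k then st.1.insert st.2 position else st.1), st.2 + 1))
        (PySem.Dict.empty, 1)).1.items
      = ((PySem.List.pyRange 0 (n : Int) 1).filter
          (fun k => decide (position ≤ 1400 + 200 * k ∧ position ≥ 1 + 200 * k))).map
          (fun k => (k + 1, position)))
  ∧ (((PySem.List.pyRange 0 (n : Int) 1).foldl
        (fun (st : PySem.Dict Int Int × Int) (k : Int) =>
          ((if position ≤ 1400 + 200 * k ∧ position ≥ 1 + 200 * k then st.1.insert st.2 position else st.1), st.2 + 1))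
        (PySem.Dict.empty, 1)).2 = (n : Int) + 1) := by
  induction n with
  | zero =>
    rw [show ((0 : Nat) : Int) = 0 from rfl, PySem.List.pyRange_one_eq_nil (by norm_num : (0:Int) ≤ 0)]
    exact ⟨rfl, by norm_num⟩
  | succ m ih =>
    have hsplit : PySem.List.pyRange 0 ((m + 1 : Nat) : Int) 1
        = PySem.List.pyRange 0 (m : Int) 1 ++ [(m : Int)] := by
      have := PySem.List.pyRange_one_succ_right (a := 0) (b := (m : Int)) (by exact_mod_cast Nat.zero_le m)
      push_cast
      exact this
    rw [hsplit, List.foldl_append, List.filter_append, List.map_append]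
    obtain ⟨hitems, hx⟩ := ih
    set F := ((PySem.List.pyRange 0 (m : Int) 1).foldl
        (fun (st : PySem.Dict Int Int × Int) (k : Int) =>
          ((if position ≤ 1400 + 200 * k ∧ position ≥ 1 + 200 * k then st.1.insert st.2 position else st.1), st.2 + 1))
        (PySem.Dict.empty, 1)) with hF
    by_cases hc : position ≤ 1400 + 200 * (m : Int) ∧ position ≥ 1 + 200 * (m : Int)
    · have hnc : F.1.contains ((m : Int) + 1) = false := by
        apply Bool.not_eq_true _ |>.mp
        intro habs
        have hmem := (PySem.Dict.contains_iff_mem_keys F.1 ((m : Int) + 1)).mp habs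
        have hkeys : F.1.keys = F.1.items.map (·.1) := rfl
        rw [hkeys, hitems, List.map_map] at hmem
        obtain ⟨k, hk, hk2⟩ := List.mem_map.mp hmem
        have hklt := (PySem.List.mem_pyRange_one.mp (List.mem_filter.mp hk).1).2
        simp at hk2
        omega
      constructor
      · simp only [List.foldl_cons, List.foldl_nil, if_pos hc]
        rw [hx, PySem.Dict.items_insert_of_not_contains F.1 position hnc, hitems]
        simp [hc]
      · simp only [List.foldl_cons, List.foldl_nil, if_pos hc, hx]
        push_cast; ring
    · constructor
      · simp only [List.foldl_cons, List.foldl_nil, if_neg hc]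
        rw [hitems]
        simp [hc]
      · simp only [List.foldl_cons, List.foldl_nil, if_neg hc, hx]
        push_cast; ring
  
-- filtering an interval condition out of a unit-step range yields a contiguous range
theorem pv_filter_interval (lo hi : Int) : ∀ (fuel : Nat) (a b : Int), (b - a).toNat ≤ fuel →
    (PySem.List.pyRange a b 1).filter (fun k => decide (lo ≤ k ∧ k ≤ hi))
      = PySem.List.pyRange (max a lo) (min b (hi + 1)) 1 := by
  intro fuel
  induction fuel with
  | zero =>
    intro a b hb
    have hba : b ≤ a := by omega
    rw [PySem.List.pyRange_one_eq_nil hba, PySem.List.pyRange_one_eq_nil (by omega)]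
    rfl
  | succ f ih =>
    intro a b hb
    by_cases hab : a < b
    · rw [PySem.List.pyRange_one_cons hab]
      by_cases h1 : lo ≤ a ∧ a ≤ hi
      · have : (PySem.List.pyRange (a + 1) b 1).filter (fun k => decide (lo ≤ k ∧ k ≤ hi))
            = PySem.List.pyRange (max (a + 1) lo) (min b (hi + 1)) 1 := ih (a + 1) b (by omega)
        obtain ⟨h1a, h1b⟩ := h1
        rw [List.filter_cons_of_pos (by simp; omega), this]
        have hmax : max a lo = a := by omega
        have hmax' : max (a + 1) lo = a + 1 := by omega
        have hlt : a < min b (hi + 1) := by omega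
        rw [hmax, hmax']
        conv_rhs => rw [PySem.List.pyRange_one_cons hlt]
      · rw [List.filter_cons_of_neg (by simp; omega), ih (a + 1) b (by omega)]
        rcases not_and_or.mp h1 with h2 | h2
        · have : max a lo = max (a + 1) lo := by omega
          rw [this]
        · rw [PySem.List.pyRange_one_eq_nil (by omega), PySem.List.pyRange_one_eq_nil (by omega)]
    · rw [PySem.List.pyRange_one_eq_nil (by omega), PySem.List.pyRange_one_eq_nil (by omega)]
      rfl

-- the window condition is exactly an interval on the index
theorem pv_cond_iff (position k : Int) :
    (position ≤ 1400 + 200 * k ∧ position ≥ 1 + 200 * k)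
      ↔ (-(PySem.Int.floordiv (1400 - position) 200) ≤ k
          ∧ k ≤ PySem.Int.floordiv (position - 1) 200) := by
  have h1 : k ≤ PySem.Int.floordiv (position - 1) 200 ↔ k * 200 ≤ position - 1 :=
    PySem.Int.le_floordiv_iff_mul_le (by norm_num)
  have h2 : -k ≤ PySem.Int.floordiv (1400 - position) 200 ↔ -k * 200 ≤ 1400 - position :=
    PySem.Int.le_floordiv_iff_mul_le (by norm_num)
  constructor
  · rintro ⟨ha, hb⟩
    refine ⟨?_, h1.mpr (by omega)⟩
    have := h2.mpr (by omega)
    omega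
  · rintro ⟨ha, hb⟩
    have hb' := h1.mp hb
    have ha' := h2.mp (by omega)
    omega

-- ===== VERDICT (by name: the statement is the Claim_ definition above) =====
theorem which_model_spec : Claim_equal_which_model := by
  intro position _
  unfold Spec_which_model which_model which_model_alt
  rw [pv_zip_eq, List.foldl_map]
  have h128 : ((128 : Nat) : Int) = 128 := by norm_num
  have hfold := (pv_fold_items position 128).1
  rw [h128] at hfold
  rw [hfold]
  have hcong : (PySem.List.pyRange 0 128 1).filter
        (fun k => decide (position ≤ 1400 + 200 * k ∧ position ≥ 1 + 200 * k))
      = (PySem.List.pyRange 0 128 1).filter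
        (fun k => decide (-(PySem.Int.floordiv (1400 - position) 200) ≤ k
            ∧ k ≤ PySem.Int.floordiv (position - 1) 200)) := by
    apply List.filter_congr
    intro k _
    simp only [decide_eq_decide]
    exact pv_cond_iff position k
  rw [hcong,
    pv_filter_interval (-(PySem.Int.floordiv (1400 - position) 200))
      (PySem.Int.floordiv (position - 1) 200) 128 0 128 (by norm_num)]
  have hmin : min (128 : Int) (PySem.Int.floordiv (position - 1) 200 + 1)
      = min 127 (PySem.Int.floordiv (position - 1) 200) + 1 := by omega
  rw [hmin]
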